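-- pv_equiv track=rewrite | github.com/mwisnowski/mtg_python_deckbuilder | code/deck_builder/color_identity_utils.py | color_label_from_code
-- ===== SOURCE A (Python) =====
-- _COLOR_NAMES: dict[str, str] = {
--     "W": "White",
--     "U": "Blue",
--     "B": "Black",
--     "R": "Red",
--     "G": "Green",
--     "C": "Colorless",
-- }
--
-- _TWO_COLOR_LABELS: dict[str, str] = {
--     "WU": "Azorius",
--     "UB": "Dimir",
--     "BR": "Rakdos",
--     "RG": "Gruul",
--     "WG": "Selesnya",
--     "WB": "Orzhov",
--     "UR": "Izzet",
--     "BG": "Golgari",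
--     "WR": "Boros",
--     "UG": "Simic",
-- }
--
-- _THREE_COLOR_LABELS: dict[str, str] = {
--     "WUB": "Esper",
--     "UBR": "Grixis",
--     "BRG": "Jund",
--     "WRG": "Naya",
--     "WUG": "Bant",
--     "WBR": "Mardu",
--     "WUR": "Jeskai",
--     "UBG": "Sultai",
--     "URG": "Temur",
--     "WBG": "Abzan",
-- }
--
-- _FOUR_COLOR_LABELS: dict[str, str] = {
--     "WUBR": "Yore-Tiller",
--     "WUBG": "Witch-Maw",
--     "WURG": "Ink-Treader",
--     "WBRG": "Dune-Brood",
--     "UBRG": "Glint-Eye",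
-- }
--
-- def color_label_from_code(code: str) -> str:
--     if not code:
--         return ""
--     if code == "C":
--         return "Colorless (C)"
--     if len(code) == 1:
--         base = _COLOR_NAMES.get(code, code)
--         return f"{base} ({code})"
--     if len(code) == 2:
--         label = _TWO_COLOR_LABELS.get(code)
--         if label:
--             return f"{label} ({code})"
--     if len(code) == 3:
--         label = _THREE_COLOR_LABELS.get(code)
--         if label:
--             return f"{label} ({code})"
--     if len(code) == 4:
--         label = _FOUR_COLOR_LABELS.get(code)
--         if label:
--             return f"{label} ({code})"
--     if code == "WUBRG":
--         return "Five-Color (WUBRG)"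
--     parts = [_COLOR_NAMES.get(ch, ch) for ch in code]
--     pretty = " / ".join(parts)
--     return f"{pretty} ({code})"
-- ===== SOURCE B (Python) =====
-- _COLOR_NAMES: dict[str, str] = {
--     "W": "White",
--     "U": "Blue",
--     "B": "Black",
--     "R": "Red",
--     "G": "Green",
--     "C": "Colorless",
-- }
--
-- # WUBRG index per color; any other character maps to -1
-- _WUBRG_IDX: dict[str, int] = {"W": 0, "U": 1, "B": 2, "R": 3, "G": 4}
--
-- # Named combos keyed by BITMASK of colors (bit i = _WUBRG_IDX).  Every named code in the
-- # original tables is strictly increasing in WUBRG order, and ALL C(5,k) masks for k=2..5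
-- # are named, so the mask determines the label.
-- _MASK_LABELS: dict[int, str] = {
--     0b00011: "Azorius", 0b00110: "Dimir", 0b01100: "Rakdos", 0b11000: "Gruul", 0b10001: "Selesnya",
--     0b00101: "Orzhov", 0b01010: "Izzet", 0b10100: "Golgari", 0b01001: "Boros", 0b10010: "Simic",
--     0b00111: "Esper", 0b01110: "Grixis", 0b11100: "Jund", 0b11001: "Naya", 0b10011: "Bant",
--     0b01101: "Mardu", 0b01011: "Jeskai", 0b10110: "Sultai", 0b11010: "Temur", 0b10101: "Abzan",
--     0b01111: "Yore-Tiller", 0b10111: "Witch-Maw", 0b11011: "Ink-Treader",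
--     0b11101: "Dune-Brood", 0b11110: "Glint-Eye",
--     0b11111: "Five-Color",
-- }
--
--
-- def color_label_from_code(code: str) -> str:
--     if not code:
--         return ""
--     if len(code) == 1:
--         return f"{_COLOR_NAMES.get(code, code)} ({code})"
--     # single scan: the code is a named combo iff its WUBRG indices are strictly increasing
--     mask = 0
--     prev = -1
--     for ch in code:
--         i = _WUBRG_IDX.get(ch, -1)
--         if i <= prev:
--             pretty = " / ".join(_COLOR_NAMES.get(c, c) for c in code)
--             return f"{pretty} ({code})"
--         mask |= 1 << i
--         prev = i
--     # mask has len(code) >= 2 bits set, so it is always present in _MASK_LABELS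
--     return f"{_MASK_LABELS[mask]} ({code})"
-- ===== Notes on version B (the rewrite author's own statement) =====
-- stated objective: alternative
-- what changed: Replaces the per-length string-keyed table lookups (plus 'C'/'WUBRG' special cases) with a single left-to-right scan that maps each character to its WUBRG index, checks the indices are strictly increasing, and looks the resulting bitmask up in one mask-keyed table; non-canonical codes fall to the slash-join during the scan.
import Mathlib
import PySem

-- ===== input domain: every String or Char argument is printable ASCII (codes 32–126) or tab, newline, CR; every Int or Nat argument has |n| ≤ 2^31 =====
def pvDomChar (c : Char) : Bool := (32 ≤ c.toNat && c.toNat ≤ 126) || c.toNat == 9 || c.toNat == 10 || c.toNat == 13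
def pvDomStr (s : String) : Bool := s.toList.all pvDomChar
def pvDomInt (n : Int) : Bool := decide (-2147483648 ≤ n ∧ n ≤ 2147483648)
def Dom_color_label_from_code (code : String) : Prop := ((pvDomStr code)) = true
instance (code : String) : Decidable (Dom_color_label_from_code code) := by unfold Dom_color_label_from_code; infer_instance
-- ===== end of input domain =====

-- B replaces A's per-length string-keyed table lookups (plus 'C'/'WUBRG' special cases) with one
-- left-to-right scan checking the WUBRG indices are strictly increasing and a bitmask-keyed table (alternative).


-- ===== PORT A =====
def pvColorNames : PySem.Dict String String := PySem.Dict.ofList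
  [("W", "White"), ("U", "Blue"), ("B", "Black"), ("R", "Red"), ("G", "Green"), ("C", "Colorless")]

def pvTwoColorLabels : PySem.Dict String String := PySem.Dict.ofList
  [("WU", "Azorius"), ("UB", "Dimir"), ("BR", "Rakdos"), ("RG", "Gruul"), ("WG", "Selesnya"),
   ("WB", "Orzhov"), ("UR", "Izzet"), ("BG", "Golgari"), ("WR", "Boros"), ("UG", "Simic")]

def pvThreeColorLabels : PySem.Dict String String := PySem.Dict.ofList
  [("WUB", "Esper"), ("UBR", "Grixis"), ("BRG", "Jund"), ("WRG", "Naya"), ("WUG", "Bant"),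
   ("WBR", "Mardu"), ("WUR", "Jeskai"), ("UBG", "Sultai"), ("URG", "Temur"), ("WBG", "Abzan")]

def pvFourColorLabels : PySem.Dict String String := PySem.Dict.ofList
  [("WUBR", "Yore-Tiller"), ("WUBG", "Witch-Maw"), ("WURG", "Ink-Treader"),
   ("WBRG", "Dune-Brood"), ("UBRG", "Glint-Eye")]

-- `if label:` in A tests a value drawn from these literal dicts, whose values are all nonempty
-- strings, so it is exactly the `some` case of the Option.
def color_label_from_code (code : String) : String :=
  if code == "" then ""
  else if code == "C" then "Colorless (C)"
  else if PySem.Str.len code == 1 then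
    (pvColorNames.getD code code) ++ " (" ++ code ++ ")"
  else
    match (if PySem.Str.len code == 2 then pvTwoColorLabels.get? code else none) with
    | some label => label ++ " (" ++ code ++ ")"
    | none =>
      match (if PySem.Str.len code == 3 then pvThreeColorLabels.get? code else none) with
      | some label => label ++ " (" ++ code ++ ")"
      | none =>
        match (if PySem.Str.len code == 4 then pvFourColorLabels.get? code else none) with
        | some label => label ++ " (" ++ code ++ ")"
        | none =>
          if code == "WUBRG" then "Five-Color (WUBRG)"
          else
            PySem.Str.join " / "
              (code.toList.map (fun ch => pvColorNames.getD (String.ofList [ch]) (String.ofList [ch])))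
              ++ " (" ++ code ++ ")"

-- ===== PORT B =====
-- _WUBRG_IDX from Source B
def pvWubrgIdx : PySem.Dict String Int := PySem.Dict.ofList
  [("W", 0), ("U", 1), ("B", 2), ("R", 3), ("G", 4)]

-- _MASK_LABELS from Source B (keys are the decimal values of Source B's binary literals)
def pvMaskLabels : PySem.Dict Int String := PySem.Dict.ofList
  [(3, "Azorius"), (6, "Dimir"), (12, "Rakdos"), (24, "Gruul"), (17, "Selesnya"),
   (5, "Orzhov"), (10, "Izzet"), (20, "Golgari"), (9, "Boros"), (18, "Simic"),
   (7, "Esper"), (14, "Grixis"), (28, "Jund"), (25, "Naya"), (19, "Bant"),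
   (13, "Mardu"), (11, "Jeskai"), (22, "Sultai"), (26, "Temur"), (21, "Abzan"),
   (15, "Yore-Tiller"), (23, "Witch-Maw"), (27, "Ink-Treader"),
   (29, "Dune-Brood"), (30, "Glint-Eye"),
   (31, "Five-Color")]

-- Source B's for-loop over `code`: `some mask` = the loop ran to the end, `none` = the early `return`
-- of the slash-join fallback.  Python's `1 << i` is `1 <<< i.toNat`, exact because in the taken
-- branch i > prev ≥ -1 (prev starts at -1 and afterwards equals a previous i), so i ≥ 0.
def pvScan (prev mask : Int) : List Char → Option Int
  | [] => some mask
  | ch :: rest =>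
    let i := pvWubrgIdx.getD (String.ofList [ch]) (-1)
    if i ≤ prev then none
    else pvScan i (PySem.Int.bor mask ((1 : Int) <<< i.toNat)) rest

def color_label_from_code_alt (code : String) : String :=
  if code == "" then ""
  else if PySem.Str.len code == 1 then
    (pvColorNames.getD code code) ++ " (" ++ code ++ ")"
  else
    match pvScan (-1) 0 code.toList with
    | none =>
      PySem.Str.join " / "
        (code.toList.map (fun ch => pvColorNames.getD (String.ofList [ch]) (String.ofList [ch])))
        ++ " (" ++ code ++ ")"
    | some mask =>
      -- _MASK_LABELS[mask]: the key is always present when this line is reached (the mask has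
      -- len(code) ≥ 2 distinct bits and every such mask is a key), so Python never raises and
      -- the "" default is unreachable: the port is exact everywhere Python returns.
      (pvMaskLabels.getD mask "") ++ " (" ++ code ++ ")"

-- ===== PRECONDITION & SPEC =====
def Spec_color_label_from_code (code : String) (out : String) : Prop := out = color_label_from_code_alt code
instance (code : String) (out : String) : Decidable (Spec_color_label_from_code code out) := by unfold Spec_color_label_from_code; infer_instance

-- ===== CLAIM (what is proved, stated in full; the proofs are below) =====
def Claim_equal_color_label_from_code : Prop := ∀ (code : String), Dom_color_label_from_code code → Spec_color_label_from_code code (color_label_from_code code)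

-- ===== LEMMAS AND PROOFS =====

-- a successful scan from `prev` walks strictly increasing WUBRG indices, i.e. the characters
-- form a sublist of the suffix of "WUBRG" after position prev
theorem pvScan_sublist : ∀ (cs : List Char) (prev mask m : Int), -1 ≤ prev →
    pvScan prev mask cs = some m → List.Sublist cs (['W', 'U', 'B', 'R', 'G'].drop (prev + 1).toNat) := by
  intro cs
  induction cs with
  | nil => intro _ _ _ _ _; exact List.nil_sublist _
  | cons ch rest ih =>
    intro prev mask m hprev h
    simp only [pvScan] at h
    by_cases hmem : ch = 'W' ∨ ch = 'U' ∨ ch = 'B' ∨ ch = 'R' ∨ ch = 'G'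
    · rcases hmem with hc | hc | hc | hc | hc <;> subst hc <;>
        simp only [show pvWubrgIdx.getD (String.ofList ['W']) (-1) = 0 from by decide,
                   show pvWubrgIdx.getD (String.ofList ['U']) (-1) = 1 from by decide,
                   show pvWubrgIdx.getD (String.ofList ['B']) (-1) = 2 from by decide,
                   show pvWubrgIdx.getD (String.ofList ['R']) (-1) = 3 from by decide,
                   show pvWubrgIdx.getD (String.ofList ['G']) (-1) = 4 from by decide] at h <;>
      · split at h
        · exact absurd h (by simp)
        · rename_i hgt
          have hrest := ih _ _ _ (by omega) h
          have hj4 : (prev + 1).toNat ≤ 4 := by omega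
          set j := (prev + 1).toNat with hjdef
          have hjle : j ≤ 4 := hj4
          have hjk : prev + 1 ≤ 4 := by omega
          interval_cases j <;>
            first
            | omega
            | exact List.Sublist.trans (List.Sublist.cons₂ _ hrest) (by decide)
    · push Not at hmem
      obtain ⟨h0, h1, h2, h3, h4⟩ := hmem
      have esingle : ∀ (c : Char), c ≠ ch → (String.ofList [c] == String.ofList [ch]) = false := by
        intro c hc
        simp only [beq_eq_false_iff_ne]
        intro hEq
        have := congrArg String.toList hEq
        simp only [String.toList_ofList, List.cons.injEq, and_true] at this
        exact hc this
      have hidx : pvWubrgIdx.getD (String.ofList [ch]) (-1) = -1 := by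
        rw [show pvWubrgIdx = PySem.Dict.mk [("W", 0), ("U", 1), ("B", 2), ("R", 3), ("G", 4)] from by decide]
        simp [PySem.Dict.getD, PySem.Dict.get?,
          show ("W" == String.ofList [ch]) = false from by
            rw [show ("W" : String) = String.ofList ['W'] from by decide]; exact esingle 'W' (Ne.symm h0),
          show ("U" == String.ofList [ch]) = false from by
            rw [show ("U" : String) = String.ofList ['U'] from by decide]; exact esingle 'U' (Ne.symm h1),
          show ("B" == String.ofList [ch]) = false from by
            rw [show ("B" : String) = String.ofList ['B'] from by decide]; exact esingle 'B' (Ne.symm h2),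
          show ("R" == String.ofList [ch]) = false from by
            rw [show ("R" : String) = String.ofList ['R'] from by decide]; exact esingle 'R' (Ne.symm h3),
          show ("G" == String.ofList [ch]) = false from by
            rw [show ("G" : String) = String.ofList ['G'] from by decide]; exact esingle 'G' (Ne.symm h4)]
      rw [hidx, if_pos (by omega)] at h
      exact absurd h (by simp)

theorem pvSublists_eq : List.sublists ['W', 'U', 'B', 'R', 'G'] =
  [[], ['W'], ['U'], ['W','U'], ['B'], ['W','B'], ['U','B'], ['W','U','B'],
   ['R'], ['W','R'], ['U','R'], ['W','U','R'], ['B','R'], ['W','B','R'], ['U','B','R'], ['W','U','B','R'],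
   ['G'], ['W','G'], ['U','G'], ['W','U','G'], ['B','G'], ['W','B','G'], ['U','B','G'], ['W','U','B','G'],
   ['R','G'], ['W','R','G'], ['U','R','G'], ['W','U','R','G'], ['B','R','G'], ['W','B','R','G'],
   ['U','B','R','G'], ['W','U','B','R','G']] := by decide

-- ===== VERDICT (by name: the statement is the Claim_ definition above) =====
set_option maxRecDepth 4000 in
theorem color_label_from_code_spec : Claim_equal_color_label_from_code := by
  intro code _
  unfold Spec_color_label_from_code
  by_cases hS : List.Sublist code.toList ['W', 'U', 'B', 'R', 'G']
  · -- canonical codes (and their prefixes): finitely many strings, check each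
    have hm : code.toList ∈ List.sublists ['W', 'U', 'B', 'R', 'G'] := List.mem_sublists.mpr hS
    rw [pvSublists_eq] at hm
    simp only [List.mem_cons, List.not_mem_nil, or_false] at hm
    rcases hm with h|h|h|h|h|h|h|h|h|h|h|h|h|h|h|h|h|h|h|h|h|h|h|h|h|h|h|h|h|h|h|h <;>
      (rw [show code = String.ofList code.toList from String.ofList_toList.symm, h]; decide)
  · -- non-canonical: both sides fall to the slash-join (or the shared single-char branch)
    have hE : code ≠ "" := by
      intro h; exact hS (by rw [h]; decide)
    have eE : (code == "") = false := beq_eq_false_iff_ne.mpr hE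
    have hScan : pvScan (-1) 0 code.toList = none := by
      cases hsc : pvScan (-1) 0 code.toList with
      | none => rfl
      | some m =>
        have := pvScan_sublist _ _ _ _ (le_refl (-1)) hsc
        simp only [show ((-1 : Int) + 1).toNat = 0 from by decide, List.drop_zero] at this
        exact absurd this hS
    by_cases hlen1 : code.toList.length = 1
    · by_cases hC : code = "C"
      · subst hC; decide
      · have eC : (code == "C") = false := beq_eq_false_iff_ne.mpr hC
        have hlen : code.length = 1 := by rwa [← String.length_toList]
        simp [color_label_from_code, color_label_from_code_alt, eE, eC, PySem.Str.len_eq, hlen]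
    · have hC : code ≠ "C" := fun h => hlen1 (by rw [h]; decide)
      have eC : (code == "C") = false := beq_eq_false_iff_ne.mpr hC
      have hlen : ¬ code.length = 1 := by rwa [String.length_toList] at hlen1
      have n6 : code ≠ "WU" := fun h => hS (by rw [h]; decide)
      have e6 : ("WU" == code) = false := beq_eq_false_iff_ne.mpr (Ne.symm n6)
      have n7 : code ≠ "UB" := fun h => hS (by rw [h]; decide)
      have e7 : ("UB" == code) = false := beq_eq_false_iff_ne.mpr (Ne.symm n7)
      have n8 : code ≠ "BR" := fun h => hS (by rw [h]; decide)
      have e8 : ("BR" == code) = false := beq_eq_false_iff_ne.mpr (Ne.symm n8)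
      have n9 : code ≠ "RG" := fun h => hS (by rw [h]; decide)
      have e9 : ("RG" == code) = false := beq_eq_false_iff_ne.mpr (Ne.symm n9)
      have n10 : code ≠ "WG" := fun h => hS (by rw [h]; decide)
      have e10 : ("WG" == code) = false := beq_eq_false_iff_ne.mpr (Ne.symm n10)
      have n11 : code ≠ "WB" := fun h => hS (by rw [h]; decide)
      have e11 : ("WB" == code) = false := beq_eq_false_iff_ne.mpr (Ne.symm n11)
      have n12 : code ≠ "UR" := fun h => hS (by rw [h]; decide)
      have e12 : ("UR" == code) = false := beq_eq_false_iff_ne.mpr (Ne.symm n12)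
      have n13 : code ≠ "BG" := fun h => hS (by rw [h]; decide)
      have e13 : ("BG" == code) = false := beq_eq_false_iff_ne.mpr (Ne.symm n13)
      have n14 : code ≠ "WR" := fun h => hS (by rw [h]; decide)
      have e14 : ("WR" == code) = false := beq_eq_false_iff_ne.mpr (Ne.symm n14)
      have n15 : code ≠ "UG" := fun h => hS (by rw [h]; decide)
      have e15 : ("UG" == code) = false := beq_eq_false_iff_ne.mpr (Ne.symm n15)
      have n16 : code ≠ "WUB" := fun h => hS (by rw [h]; decide)
      have e16 : ("WUB" == code) = false := beq_eq_false_iff_ne.mpr (Ne.symm n16)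
      have n17 : code ≠ "UBR" := fun h => hS (by rw [h]; decide)
      have e17 : ("UBR" == code) = false := beq_eq_false_iff_ne.mpr (Ne.symm n17)
      have n18 : code ≠ "BRG" := fun h => hS (by rw [h]; decide)
      have e18 : ("BRG" == code) = false := beq_eq_false_iff_ne.mpr (Ne.symm n18)
      have n19 : code ≠ "WRG" := fun h => hS (by rw [h]; decide)
      have e19 : ("WRG" == code) = false := beq_eq_false_iff_ne.mpr (Ne.symm n19)
      have n20 : code ≠ "WUG" := fun h => hS (by rw [h]; decide)
      have e20 : ("WUG" == code) = false := beq_eq_false_iff_ne.mpr (Ne.symm n20)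
      have n21 : code ≠ "WBR" := fun h => hS (by rw [h]; decide)
      have e21 : ("WBR" == code) = false := beq_eq_false_iff_ne.mpr (Ne.symm n21)
      have n22 : code ≠ "WUR" := fun h => hS (by rw [h]; decide)
      have e22 : ("WUR" == code) = false := beq_eq_false_iff_ne.mpr (Ne.symm n22)
      have n23 : code ≠ "UBG" := fun h => hS (by rw [h]; decide)
      have e23 : ("UBG" == code) = false := beq_eq_false_iff_ne.mpr (Ne.symm n23)
      have n24 : code ≠ "URG" := fun h => hS (by rw [h]; decide)
      have e24 : ("URG" == code) = false := beq_eq_false_iff_ne.mpr (Ne.symm n24)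
      have n25 : code ≠ "WBG" := fun h => hS (by rw [h]; decide)
      have e25 : ("WBG" == code) = false := beq_eq_false_iff_ne.mpr (Ne.symm n25)
      have n26 : code ≠ "WUBR" := fun h => hS (by rw [h]; decide)
      have e26 : ("WUBR" == code) = false := beq_eq_false_iff_ne.mpr (Ne.symm n26)
      have n27 : code ≠ "WUBG" := fun h => hS (by rw [h]; decide)
      have e27 : ("WUBG" == code) = false := beq_eq_false_iff_ne.mpr (Ne.symm n27)
      have n28 : code ≠ "WURG" := fun h => hS (by rw [h]; decide)
      have e28 : ("WURG" == code) = false := beq_eq_false_iff_ne.mpr (Ne.symm n28)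
      have n29 : code ≠ "WBRG" := fun h => hS (by rw [h]; decide)
      have e29 : ("WBRG" == code) = false := beq_eq_false_iff_ne.mpr (Ne.symm n29)
      have n30 : code ≠ "UBRG" := fun h => hS (by rw [h]; decide)
      have e30 : ("UBRG" == code) = false := beq_eq_false_iff_ne.mpr (Ne.symm n30)
      have n31 : code ≠ "WUBRG" := fun h => hS (by rw [h]; decide)
      have e31 : ("WUBRG" == code) = false := beq_eq_false_iff_ne.mpr (Ne.symm n31)
      have gTwo : pvTwoColorLabels.get? code = none := by
        rw [show pvTwoColorLabels = PySem.Dict.mk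
          [("WU", "Azorius"), ("UB", "Dimir"), ("BR", "Rakdos"), ("RG", "Gruul"), ("WG", "Selesnya"),
           ("WB", "Orzhov"), ("UR", "Izzet"), ("BG", "Golgari"), ("WR", "Boros"), ("UG", "Simic")] from by decide]
        simp [PySem.Dict.get?, e6, e7, e8, e9, e10, e11, e12, e13, e14, e15]
      have gThree : pvThreeColorLabels.get? code = none := by
        rw [show pvThreeColorLabels = PySem.Dict.mk
          [("WUB", "Esper"), ("UBR", "Grixis"), ("BRG", "Jund"), ("WRG", "Naya"), ("WUG", "Bant"),
           ("WBR", "Mardu"), ("WUR", "Jeskai"), ("UBG", "Sultai"), ("URG", "Temur"), ("WBG", "Abzan")] from by decide]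
        simp [PySem.Dict.get?, e16, e17, e18, e19, e20, e21, e22, e23, e24, e25]
      have gFour : pvFourColorLabels.get? code = none := by
        rw [show pvFourColorLabels = PySem.Dict.mk
          [("WUBR", "Yore-Tiller"), ("WUBG", "Witch-Maw"), ("WURG", "Ink-Treader"),
           ("WBRG", "Dune-Brood"), ("UBRG", "Glint-Eye")] from by decide]
        simp [PySem.Dict.get?, e26, e27, e28, e29, e30]
      simp [color_label_from_code, color_label_from_code_alt, eE, eC, PySem.Str.len_eq, hlen,
            gTwo, gThree, gFour, hScan, n31]
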